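-- pv_equiv track=rewrite | github.com/yashanand1910/solutions | AlgoMonster/binary-search/newspapers.py | newspapers_split
-- ===== SOURCE A (Python) =====
-- from typing import List
--
-- def is_time_feasible(newspapers: List[int], coworkers: int, t: int) -> bool:
--     total_time = t
--     i = 0
--     workers_allocated = 1
--
--     while i < len(newspapers):
--         if newspapers[i] <= total_time:
--             total_time -= newspapers[i]
--             i += 1
--         else:
--             workers_allocated += 1
--             total_time = t
--
--     return workers_allocated <= coworkers
--
-- def newspapers_split(newspapers: List[int], coworkers: int) -> int:
--     left, right = max(newspapers), sum(newspapers)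
--     boundary_index = right
--
--     while left <= right:
--         mid = (left + right) // 2
--
--         if is_time_feasible(newspapers, coworkers, mid):
--             boundary_index = mid
--             right = mid - 1
--         else:
--             left = mid + 1
--
--     return boundary_index
-- ===== SOURCE B (Python) =====
-- from typing import List, Optional
--
-- def newspapers_split(newspapers: List[int], coworkers: int) -> int:
--     prefix = [0]
--     for x in newspapers:
--         prefix.append(prefix[-1] + x)
--     total = prefix[-1]
--
--     def groups_needed(t: int) -> int:
--         # number of contiguous groups the greedy cut of the prefix-sum
--         # array produces with per-group budget t (cut before the first
--         # prefix that exceeds the running base by more than t)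
--         count, base = 1, 0
--         for lo, hi in zip(prefix, prefix[1:]):
--             if hi - base > t:
--                 count += 1
--                 base = lo
--         return count
--
--     def search(lo: int, hi: int) -> Optional[int]:
--         if lo > hi:
--             return None
--         mid = (lo + hi) // 2
--         if groups_needed(mid) <= coworkers:
--             earlier = search(lo, mid - 1)
--             return mid if earlier is None else earlier
--         return search(mid + 1, hi)
--
--     found = search(max(newspapers), total)
--     return total if found is None else found
-- ===== Notes on version B (the rewrite author's own statement) =====
-- stated objective: alternative
-- what changed: B precomputes the prefix-sum array once and recasts the feasibility test as a single pair-scan over it (counting greedy cut points) instead of A's stateful budget-reset simulation, and replaces A's iterative bisection with a recursive Option-returning search; same probe sequence, different decomposition and data maintained.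
import Mathlib
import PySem

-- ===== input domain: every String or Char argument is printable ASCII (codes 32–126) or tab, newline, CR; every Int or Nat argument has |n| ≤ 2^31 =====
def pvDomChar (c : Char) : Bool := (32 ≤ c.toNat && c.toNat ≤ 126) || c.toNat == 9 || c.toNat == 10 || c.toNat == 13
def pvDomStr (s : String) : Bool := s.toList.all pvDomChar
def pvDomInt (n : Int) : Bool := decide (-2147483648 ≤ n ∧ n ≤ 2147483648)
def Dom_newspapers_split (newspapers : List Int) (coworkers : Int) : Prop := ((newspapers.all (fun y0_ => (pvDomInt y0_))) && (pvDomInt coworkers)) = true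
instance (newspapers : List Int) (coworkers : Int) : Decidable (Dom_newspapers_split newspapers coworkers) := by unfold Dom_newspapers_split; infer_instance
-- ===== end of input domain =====

-- B recasts the feasibility test as a single scan over precomputed prefix sums and the
-- bisection as an Option-returning recursion; same asymptotic cost, different decomposition.
-- A's answer on negative-valued lists is the value of this exact bisection trace (the greedy
-- feasibility predicate is not monotone there), so B follows the same probe sequence.

-- ===== PORT A =====
-- the while loop of is_time_feasible; it re-tests the same index after a reset, so it is
-- fuelled (fuel 2*len+1 always suffices at the call below, proved in the lemmas)
def pvFeasLoop (ns : List Int) (t : Int) : Nat → Nat → Int → Int → Int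
  | 0, _i, _total, w => w
  | fuel+1, i, total, w =>
    if i < ns.length then
      -- newspapers[i]: 0 ≤ i < len, in range
      let a := (PySem.List.pyGet? ns (i : Int)).getD 0
      if a ≤ total then pvFeasLoop ns t fuel (i+1) (total - a) w
      else pvFeasLoop ns t fuel i t (w+1)
    else w

def pvIsTimeFeasible (ns : List Int) (cw t : Int) : Bool :=
  decide (pvFeasLoop ns t (2*ns.length+1) 0 t 1 ≤ cw)

def pvSearchA (ns : List Int) (cw : Int) (left right boundary : Int) : Int :=
  if h : left ≤ right then
    let mid := PySem.Int.floordiv (left + right) 2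
    if pvIsTimeFeasible ns cw mid then pvSearchA ns cw left (mid-1) mid
    else pvSearchA ns cw (mid+1) right boundary
  else boundary
termination_by (right + 1 - left).toNat
decreasing_by
  · have hb := PySem.Int.floordiv_two_mid_bounds h; omega
  · have hb := PySem.Int.floordiv_two_mid_bounds h; omega

def newspapers_split (newspapers : List Int) (coworkers : Int) : Int :=
  match PySem.List.max? newspapers (fun y => y) with
  | none => 0   -- unreachable under Pre_: Python's max([]) raises ValueError
  | some m => pvSearchA newspapers coworkers m newspapers.sum newspapers.sum

-- ===== PORT B =====
-- prefix = [0]; for x in newspapers: prefix.append(prefix[-1] + x)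
def pvPrefixLoop (pre : List Int) (xs : List Int) : List Int :=
  xs.foldl (fun acc x => acc ++ [(PySem.List.pyGet? acc (-1)).getD 0 + x]) pre

-- groups_needed: fold over zip(prefix, prefix[1:]) with state (count, base)
def pvGroupsNeeded (pre : List Int) (t : Int) : Int :=
  ((pre.zip pre.tail).foldl
    (fun (st : Int × Int) p => if p.2 - st.2 > t then (st.1 + 1, p.1) else st) (1, 0)).1

def pvSearchB (pre : List Int) (cw : Int) (lo hi : Int) : Option Int :=
  if h : lo > hi then none
  else
    let mid := PySem.Int.floordiv (lo + hi) 2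
    if pvGroupsNeeded pre mid ≤ cw then
      match pvSearchB pre cw lo (mid-1) with
      | none => some mid
      | some v => some v
    else pvSearchB pre cw (mid+1) hi
termination_by (hi + 1 - lo).toNat
decreasing_by
  · have hb := PySem.Int.floordiv_two_mid_bounds (show lo ≤ hi by omega); omega
  · have hb := PySem.Int.floordiv_two_mid_bounds (show lo ≤ hi by omega); omega

def newspapers_split_alt (newspapers : List Int) (coworkers : Int) : Int :=
  let pre := pvPrefixLoop [0] newspapers
  let total := (PySem.List.pyGet? pre (-1)).getD 0   -- prefix[-1]; prefix is never empty
  match PySem.List.max? newspapers (fun y => y) with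
  | none => 0   -- unreachable under Pre_: Python's max([]) raises ValueError
  | some m =>
    match pvSearchB pre coworkers m total with
    | none => total
    | some v => v

-- ===== PRECONDITION & SPEC =====
-- Pre_ excludes exactly the empty list, on which A raises ValueError (max of empty sequence)
def Pre_newspapers_split (newspapers : List Int) (coworkers : Int) : Prop := newspapers ≠ []
instance (newspapers : List Int) (coworkers : Int) : Decidable (Pre_newspapers_split newspapers coworkers) := by unfold Pre_newspapers_split; infer_instance

def pvWitness_newspapers_split : List Int × Int := ([3, 1, 2], 2)

def Spec_newspapers_split (newspapers : List Int) (coworkers : Int) (out : Int) : Prop := out = newspapers_split_alt newspapers coworkers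
instance (newspapers : List Int) (coworkers : Int) (out : Int) : Decidable (Spec_newspapers_split newspapers coworkers out) := by unfold Spec_newspapers_split; infer_instance

-- ===== CLAIM (what is proved, stated in full; the proofs are below) =====
def Claim_equal_newspapers_split : Prop := ∀ (newspapers : List Int) (coworkers : Int), Dom_newspapers_split newspapers coworkers → Pre_newspapers_split newspapers coworkers → Spec_newspapers_split newspapers coworkers (newspapers_split newspapers coworkers)

-- ===== LEMMAS AND PROOFS =====

-- cons-built prefix-sum list (proof-side specification of pvPrefixLoop)
def pvPre (s : Int) : List Int → List Int
  | [] => [s]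
  | x :: rest => s :: pvPre (s + x) rest

-- extra groups the greedy cut opens beyond the current one (proof-side common spec)
def pvSegs (t : Int) : List Int → Int → Int
  | [], _ => 0
  | a :: rest, total =>
    if a ≤ total then pvSegs t rest (total - a) else 1 + pvSegs t rest (t - a)

theorem pvLast_append (l : List Int) (s : Int) :
    (PySem.List.pyGet? (l ++ [s]) (-1)).getD 0 = s := by
  simp [PySem.List.pyGet?, PySem.List.pyIdx?]

theorem pvPrefixLoop_eq (xs : List Int) : ∀ (l : List Int) (s : Int),
    pvPrefixLoop (l ++ [s]) xs = l ++ pvPre s xs := by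
  induction xs with
  | nil => intro l s; simp [pvPrefixLoop, pvPre]
  | cons x rest ih =>
    intro l s
    simp only [pvPrefixLoop, List.foldl_cons, pvLast_append]
    have := ih (l ++ [s]) (s + x)
    simp only [pvPrefixLoop] at this
    rw [List.append_assoc] at this ⊢
    simpa [pvPre] using this

theorem pvPre_split (xs : List Int) : ∀ s : Int,
    ∃ l, pvPre s xs = l ++ [s + xs.sum] := by
  induction xs with
  | nil => intro s; exact ⟨[], by simp [pvPre]⟩
  | cons x rest ih =>
    intro s
    obtain ⟨l, hl⟩ := ih (s + x)
    exact ⟨s :: l, by simp [pvPre, hl, add_assoc]⟩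

theorem pvPre_last (xs : List Int) (s : Int) :
    (PySem.List.pyGet? (pvPre s xs) (-1)).getD 0 = s + xs.sum := by
  obtain ⟨l, hl⟩ := pvPre_split xs s
  rw [hl, pvLast_append]

-- the pair scan over the prefix sums counts exactly the greedy resets
theorem pvScan_eq (t : Int) (xs : List Int) : ∀ (s base k : Int),
    (((pvPre s xs).zip (pvPre s xs).tail).foldl
      (fun (st : Int × Int) p => if p.2 - st.2 > t then (st.1 + 1, p.1) else st) (k, base)).1
      = k + pvSegs t xs (t - (s - base)) := by
  induction xs with
  | nil => intro s base k; simp [pvPre, pvSegs]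
  | cons x rest ih =>
    intro s base k
    obtain ⟨Q, hQ⟩ : ∃ Q, pvPre (s + x) rest = (s + x) :: Q := by
      cases rest <;> exact ⟨_, rfl⟩
    have h1 : pvPre s (x :: rest) = s :: (s + x) :: Q := by rw [pvPre, hQ]
    rw [h1, List.tail_cons, List.zip_cons_cons, List.foldl_cons]
    by_cases hc : s + x - base > t
    · have hrec := ih (s + x) s (k + 1)
      rw [hQ, List.tail_cons] at hrec
      simp only [if_pos hc] at *
      rw [hrec, pvSegs, if_neg (by omega : ¬ x ≤ t - (s - base))]
      have h2 : t - (s + x - s) = t - x := by ring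
      rw [h2]; ring
    · have hrec := ih (s + x) base k
      rw [hQ, List.tail_cons] at hrec
      simp only [if_neg hc] at *
      rw [hrec, pvSegs, if_pos (by omega : x ≤ t - (s - base))]
      have h2 : t - (s + x - base) = t - (s - base) - x := by ring
      rw [h2]

-- the fuelled index loop computes the same greedy reset count
theorem pvFeasLoop_eq (ns : List Int) (t : Int) (hmax : ∀ x ∈ ns, x ≤ t) :
    ∀ fuel i total w, 2 * (ns.length - i) + 1 ≤ fuel → i ≤ ns.length →
    pvFeasLoop ns t fuel i total w = w + pvSegs t (ns.drop i) total := by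
  intro fuel
  induction fuel using Nat.strong_induction_on with
  | _ fuel ih =>
    intro i total w hfuel hi
    obtain ⟨fuel, rfl⟩ : ∃ f, fuel = f + 1 := ⟨fuel - 1, by omega⟩
    by_cases hlt : i < ns.length
    · have ha : (PySem.List.pyGet? ns (i : Int)).getD 0 = ns[i] := by
        simp [PySem.List.pyGet?_natCast, List.getElem?_eq_getElem hlt]
      have hdrop : ns.drop i = ns[i] :: ns.drop (i+1) := List.drop_eq_getElem_cons hlt
      simp only [pvFeasLoop, if_pos hlt, ha]
      by_cases hacc : ns[i] ≤ total
      · rw [if_pos hacc, ih fuel (by omega) (i+1) (total - ns[i]) w (by omega) (by omega),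
            hdrop, pvSegs, if_pos hacc]
      · rw [if_neg hacc]
        obtain ⟨f, rfl⟩ : ∃ f, fuel = f + 1 := ⟨fuel - 1, by omega⟩
        simp only [pvFeasLoop, if_pos hlt, ha]
        rw [if_pos (hmax ns[i] (List.getElem_mem hlt))]
        rw [ih f (by omega) (i+1) (t - ns[i]) (w+1) (by omega) (by omega),
            hdrop, pvSegs, if_neg hacc]
        ring
    · simp only [pvFeasLoop, if_neg hlt]
      rw [List.drop_eq_nil_of_le (by omega), pvSegs]
      ring

theorem pvGroupsNeeded_eq (ns : List Int) (t : Int) :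
    pvGroupsNeeded (pvPre 0 ns) t = 1 + pvSegs t ns t := by
  have := pvScan_eq t ns 0 0 1
  simpa [pvGroupsNeeded] using this

theorem pvFeas_eq (ns : List Int) (cw t : Int) (hmax : ∀ x ∈ ns, x ≤ t) :
    pvIsTimeFeasible ns cw t = decide (pvGroupsNeeded (pvPre 0 ns) t ≤ cw) := by
  have h := pvFeasLoop_eq ns t hmax (2*ns.length+1) 0 t 1 (by omega) (by omega)
  simp only [pvIsTimeFeasible, h, List.drop_zero, pvGroupsNeeded_eq]

theorem pvSearch_eq (ns : List Int) (cw : Int) :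
    ∀ left right boundary, (∀ x ∈ ns, x ≤ left) →
    pvSearchA ns cw left right boundary =
      (match pvSearchB (pvPre 0 ns) cw left right with
       | none => boundary
       | some v => v) := by
  suffices h : ∀ (n : Nat) (left right boundary : Int), (right + 1 - left).toNat ≤ n →
      (∀ x ∈ ns, x ≤ left) →
      pvSearchA ns cw left right boundary =
        (match pvSearchB (pvPre 0 ns) cw left right with
         | none => boundary
         | some v => v) by
    intro l r b hm; exact h _ l r b le_rfl hm
  intro n
  induction n with
  | zero =>
    intro l r b hn hm
    rw [pvSearchA, dif_neg (by omega : ¬ l ≤ r), pvSearchB, dif_pos (by omega : l > r)]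
  | succ n ih =>
    intro l r b hn hm
    by_cases hlr : l ≤ r
    · have hb := PySem.Int.floordiv_two_mid_bounds hlr
      rw [pvSearchA, dif_pos hlr, pvSearchB, dif_neg (by omega : ¬ l > r)]
      have hf := pvFeas_eq ns cw (PySem.Int.floordiv (l + r) 2)
        (fun x hx => le_trans (hm x hx) hb.1)
      by_cases hP : pvGroupsNeeded (pvPre 0 ns) (PySem.Int.floordiv (l + r) 2) ≤ cw
      · have hft : pvIsTimeFeasible ns cw (PySem.Int.floordiv (l + r) 2) = true := by
          rw [hf]; exact decide_eq_true hP
        simp only [hft, if_pos hP, if_true]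
        rw [ih l (PySem.Int.floordiv (l + r) 2 - 1) (PySem.Int.floordiv (l + r) 2)
          (by omega) hm]
        cases hB : pvSearchB (pvPre 0 ns) cw l (PySem.Int.floordiv (l + r) 2 - 1) <;> simp
      · have hft : pvIsTimeFeasible ns cw (PySem.Int.floordiv (l + r) 2) = false := by
          rw [hf]; exact decide_eq_false hP
        simp only [hft, if_neg hP, Bool.false_eq_true, if_false]
        exact ih (PySem.Int.floordiv (l + r) 2 + 1) r b (by omega)
          (fun x hx => le_trans (hm x hx) (by omega))
    · rw [pvSearchA, dif_neg hlr, pvSearchB, dif_pos (by omega : l > r)]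

theorem newspapers_split_spec : Claim_equal_newspapers_split := by
  intro ns cw _dom hpre
  unfold Spec_newspapers_split Pre_newspapers_split at *
  unfold newspapers_split newspapers_split_alt
  have hpre0 : pvPrefixLoop [0] ns = pvPre 0 ns := by
    simpa using pvPrefixLoop_eq ns [] 0
  cases hmx : PySem.List.max? ns (fun y => y) with
  | none => exact absurd ((PySem.List.max?_eq_none_iff ns (fun y => y)).mp hmx) hpre
  | some m =>
    have hm : ∀ x ∈ ns, x ≤ m := fun x hx => PySem.List.max?_isMax hmx x hx
    simp only [hpre0, pvPre_last, zero_add]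
    exact pvSearch_eq ns cw m ns.sum ns.sum hm
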